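-- pv_equiv track=rewrite | github.com/aliahmadXVR/rehab_core | control/rehab_leds/src/leds_control.py | set_bits
-- ===== SOURCE A (Python) =====
-- def set_bits(num, led_1, led_2, led_3):
--     for i in range(3):
--         num = set_bit(num, i, led_1[2-i])  # Sets bits 0, 1, 2
--     for i in range(3,6):
--         num = set_bit(num, i, led_2[2-(i-3)])  # Sets bits 3, 4, 5
--     for i in range(6,9):
--         num = set_bit(num, i, led_3[2-(i-6)])  # Sets bits 6, 7, 8
--     return num
--
-- def set_bit(num, bit, value):
--     mask = 1 << bit
--     num &= ~mask
--     if value: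
--         num |= mask
--     return num
-- ===== SOURCE B (Python) =====
-- def set_bits(num, led_1, led_2, led_3):
--     pattern = ((1 if led_1[2] else 0)
--              | (2 if led_1[1] else 0)
--              | (4 if led_1[0] else 0)
--              | (8 if led_2[2] else 0)
--              | (16 if led_2[1] else 0)
--              | (32 if led_2[0] else 0)
--              | (64 if led_3[2] else 0)
--              | (128 if led_3[1] else 0)
--              | (256 if led_3[0] else 0))
--     return (num & ~0x1FF) | pattern
-- ===== Notes on version B (the rewrite author's own statement) =====
-- stated objective: simpler
-- what changed: Replaces A's three index loops and the clear-then-set set_bit helper by one straight-line expression: OR the nine truthiness-gated power-of-two constants into a pattern and merge it with a single (num & ~0x1FF) | pattern.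
import Mathlib
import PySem

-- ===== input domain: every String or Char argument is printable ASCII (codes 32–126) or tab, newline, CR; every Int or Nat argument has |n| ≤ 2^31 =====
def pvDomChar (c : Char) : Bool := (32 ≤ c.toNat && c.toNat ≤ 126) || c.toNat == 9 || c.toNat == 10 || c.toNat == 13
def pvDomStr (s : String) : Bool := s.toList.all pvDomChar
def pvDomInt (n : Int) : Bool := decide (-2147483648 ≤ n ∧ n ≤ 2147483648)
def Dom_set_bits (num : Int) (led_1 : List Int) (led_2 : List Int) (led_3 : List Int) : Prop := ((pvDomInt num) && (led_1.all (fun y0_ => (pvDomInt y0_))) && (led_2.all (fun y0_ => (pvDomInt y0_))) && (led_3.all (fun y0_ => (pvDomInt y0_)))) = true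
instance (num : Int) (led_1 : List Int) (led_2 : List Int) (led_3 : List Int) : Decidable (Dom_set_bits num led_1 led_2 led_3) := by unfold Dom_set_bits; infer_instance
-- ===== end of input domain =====

-- B replaces A's three set_bit loops by one straight-line 9-bit pattern OR-ed into num after a single mask clear (simpler; return value only).

-- ===== PORT A =====
-- set_bit(num, bit, value); Python's '1 << bit' is '1 <<< bit.toNat', exact here since every call passes bit = 0..8 ≥ 0
def set_bitL (num : Int) (bit : Int) (value : Int) : Int :=
  let mask : Int := 1 <<< bit.toNat
  let num2 := PySem.Int.band num (Int.not mask)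
  if value ≠ 0 then PySem.Int.bor num2 mask else num2

def set_bits (num : Int) (led_1 : List Int) (led_2 : List Int) (led_3 : List Int) : Int :=
  let n1 := (PySem.List.pyRange 0 3 1).foldl (fun n i => set_bitL n i (PySem.List.pyGetD led_1 (2 - i) 0)) num
  let n2 := (PySem.List.pyRange 3 6 1).foldl (fun n i => set_bitL n i (PySem.List.pyGetD led_2 (2 - (i - 3)) 0)) n1
  let n3 := (PySem.List.pyRange 6 9 1).foldl (fun n i => set_bitL n i (PySem.List.pyGetD led_3 (2 - (i - 6)) 0)) n2
  n3

-- ===== PORT B =====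
def set_bits_alt (num : Int) (led_1 : List Int) (led_2 : List Int) (led_3 : List Int) : Int :=
  let pattern : Int :=
    PySem.Int.bor (PySem.Int.bor (PySem.Int.bor (PySem.Int.bor (PySem.Int.bor (PySem.Int.bor (PySem.Int.bor (PySem.Int.bor
      (if PySem.List.pyGetD led_1 2 0 ≠ 0 then (1 : Int) else 0)
      (if PySem.List.pyGetD led_1 1 0 ≠ 0 then (2 : Int) else 0))
      (if PySem.List.pyGetD led_1 0 0 ≠ 0 then (4 : Int) else 0))
      (if PySem.List.pyGetD led_2 2 0 ≠ 0 then (8 : Int) else 0))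
      (if PySem.List.pyGetD led_2 1 0 ≠ 0 then (16 : Int) else 0))
      (if PySem.List.pyGetD led_2 0 0 ≠ 0 then (32 : Int) else 0))
      (if PySem.List.pyGetD led_3 2 0 ≠ 0 then (64 : Int) else 0))
      (if PySem.List.pyGetD led_3 1 0 ≠ 0 then (128 : Int) else 0))
      (if PySem.List.pyGetD led_3 0 0 ≠ 0 then (256 : Int) else 0)
  PySem.Int.bor (PySem.Int.band num (Int.not 511)) pattern

-- ===== PRECONDITION & SPEC =====
-- Pre_ excludes exactly the inputs on which A raises IndexError: some led list has fewer than 3 entries.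
def Pre_set_bits (num : Int) (led_1 : List Int) (led_2 : List Int) (led_3 : List Int) : Prop :=
  3 ≤ led_1.length ∧ 3 ≤ led_2.length ∧ 3 ≤ led_3.length
instance (num : Int) (led_1 : List Int) (led_2 : List Int) (led_3 : List Int) : Decidable (Pre_set_bits num led_1 led_2 led_3) := by unfold Pre_set_bits; infer_instance

def pvWitness_set_bits : Int × List Int × List Int × List Int := (5, [1, 0, 1], [0, 0, 7], [1, 1, 0])

def Spec_set_bits (num : Int) (led_1 : List Int) (led_2 : List Int) (led_3 : List Int) (out : Int) : Prop := out = set_bits_alt num led_1 led_2 led_3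
instance (num : Int) (led_1 : List Int) (led_2 : List Int) (led_3 : List Int) (out : Int) : Decidable (Spec_set_bits num led_1 led_2 led_3 out) := by unfold Spec_set_bits; infer_instance

-- ===== CLAIM (what is proved, stated in full; the proofs are below) =====
def Claim_equal_set_bits : Prop := ∀ (num : Int) (led_1 : List Int) (led_2 : List Int) (led_3 : List Int), Dom_set_bits num led_1 led_2 led_3 → Pre_set_bits num led_1 led_2 led_3 → Spec_set_bits num led_1 led_2 led_3 (set_bits num led_1 led_2 led_3)

-- ===== LEMMAS AND PROOFS =====

-- Nat: bits of a literal beyond its width are 0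
theorem pv_testBit_high {m k : Nat} (h : m ≤ k) : m.testBit k = false :=
  Nat.testBit_lt_two_pow (lt_of_lt_of_le Nat.lt_two_pow_self (Nat.pow_le_pow_right (by norm_num) h))

-- two Ints with the same bits are equal
theorem pv_int_ext {a b : Int} (h : ∀ k, a.testBit k = b.testBit k) : a = b := by
  cases a with
  | ofNat m =>
    cases b with
    | ofNat n => exact congrArg Int.ofNat (Nat.eq_of_testBit_eq h)
    | negSucc n =>
      exfalso
      have hk := h (m + n)
      simp [Int.testBit, pv_testBit_high (Nat.le_add_right m n), pv_testBit_high (Nat.le_add_left n m)] at hk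
  | negSucc m =>
    cases b with
    | ofNat n =>
      exfalso
      have hk := h (m + n)
      simp [Int.testBit, pv_testBit_high (Nat.le_add_right m n), pv_testBit_high (Nat.le_add_left n m)] at hk
    | negSucc n =>
      have : m = n := Nat.eq_of_testBit_eq (fun i => by have := h i; simpa [Int.testBit] using this)
      simp [this]

theorem pv_ldiff_div_two (m n : Nat) : Nat.ldiff m n / 2 = Nat.ldiff (m / 2) (n / 2) :=
  Nat.eq_of_testBit_eq (fun i => by simp [Nat.testBit_div_two, Nat.testBit_ldiff])

theorem pv_and_add_ldiff (m : Nat) : ∀ n, (m &&& n) + Nat.ldiff m n = m := by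
  induction m using Nat.strong_induction_on with
  | _ m IH =>
    intro n
    rcases Nat.eq_zero_or_pos m with h0 | hpos
    · subst h0; simp [Nat.ldiff]
    · have IH2 := IH (m / 2) (Nat.div_lt_self hpos (by norm_num)) (n / 2)
      have e1 := Nat.div_add_mod (m &&& n) 2
      have e2 := Nat.div_add_mod (Nat.ldiff m n) 2
      rw [Nat.and_div_two] at e1
      rw [pv_ldiff_div_two] at e2
      have t1 := Nat.testBit_and m n 0
      have t2 := Nat.testBit_ldiff m n 0
      simp only [Nat.testBit_zero] at t1 t2
      rcases Nat.mod_two_eq_zero_or_one m with hm | hm <;>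
        rcases Nat.mod_two_eq_zero_or_one n with hn | hn <;>
        rcases Nat.mod_two_eq_zero_or_one (m &&& n) with ha | ha <;>
        rcases Nat.mod_two_eq_zero_or_one (Nat.ldiff m n) with hl | hl <;>
        simp [hm, hn, ha, hl] at t1 t2 ⊢ <;>
        omega

theorem pv_sub_and_eq_ldiff (m n : Nat) : m - (m &&& n) = Nat.ldiff m n := by
  have h := pv_and_add_ldiff m n
  omega

-- PySem's Python-exact bitwise ops coincide with Mathlib's Int.land / Int.lor
theorem pv_band_eq_land (a b : Int) : PySem.Int.band a b = Int.land a b := by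
  cases a with
  | ofNat m =>
    cases b with
    | ofNat n => simp [PySem.Int.band, Int.land]
    | negSucc n =>
      have h1 : ¬ (0 ≤ Int.negSucc n) := by omega
      have h2 : (-(Int.negSucc n) - 1).toNat = n := by omega
      simp [PySem.Int.band, Int.land, h1, pv_sub_and_eq_ldiff]
  | negSucc m =>
    have h1 : ¬ (0 ≤ Int.negSucc m) := by omega
    have h2 : (-(Int.negSucc m) - 1).toNat = m := by omega
    cases b with
    | ofNat n => simp [PySem.Int.band, Int.land, h1, pv_sub_and_eq_ldiff]
    | negSucc n =>
      have h3 : ¬ (0 ≤ Int.negSucc n) := by omega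
      have h4 : (-(Int.negSucc n) - 1).toNat = n := by omega
      simp [PySem.Int.band, Int.land, h1, h3]
      omega

theorem pv_bor_eq_lor (a b : Int) : PySem.Int.bor a b = Int.lor a b := by
  cases a with
  | ofNat m =>
    cases b with
    | ofNat n => simp [PySem.Int.bor, Int.lor]
    | negSucc n =>
      have h1 : ¬ (0 ≤ Int.negSucc n) := by omega
      have h2 : (-(Int.negSucc n) - 1).toNat = n := by omega
      simp [PySem.Int.bor, Int.lor, h1, pv_sub_and_eq_ldiff]
      omega
  | negSucc m =>
    have h1 : ¬ (0 ≤ Int.negSucc m) := by omega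
    have h2 : (-(Int.negSucc m) - 1).toNat = m := by omega
    cases b with
    | ofNat n =>
      simp [PySem.Int.bor, Int.lor, h1]
      rw [pv_sub_and_eq_ldiff]
      omega
    | negSucc n =>
      have h3 : ¬ (0 ≤ Int.negSucc n) := by omega
      have h4 : (-(Int.negSucc n) - 1).toNat = n := by omega
      simp [PySem.Int.bor, Int.lor, h1, h3]
      omega

theorem pv_not_eq_lnot (a : Int) : Int.not a = Int.lnot a := by cases a <;> rfl

theorem pv_testBit_natCast (n : Nat) (k : Nat) : ((n : Int)).testBit k = n.testBit k := rfl

-- one set_bit call, bit by bit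
theorem pv_testBit_set_bitL (num v : Int) (b k : Nat) :
    (set_bitL num ((b : Nat) : Int) v).testBit k = if b = k then decide (v ≠ 0) else num.testBit k := by
  have hm : ((1 <<< Int.toNat ((b : Nat) : Int) : Nat) : Int) = ((2 ^ b : Nat) : Int) := by
    rw [Int.toNat_natCast, Nat.one_shiftLeft]
  simp only [set_bitL, pv_band_eq_land, pv_bor_eq_lor, pv_not_eq_lnot, hm]
  simp only [apply_ite (fun x : Int => x.testBit k), Int.testBit_land, Int.testBit_lor,
    Int.testBit_lnot, pv_testBit_natCast, Nat.testBit_two_pow]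
  by_cases hb : b = k <;> by_cases hv : v ≠ 0 <;> simp [hb, hv]

theorem pv_testBit_set_bitL' (num v : Int) (b : Int) (hb : 0 ≤ b) (k : Nat) :
    (set_bitL num b v).testBit k = if b.toNat = k then decide (v ≠ 0) else num.testBit k := by
  obtain ⟨n, rfl⟩ : ∃ n : Nat, b = ((n : Nat) : Int) := ⟨b.toNat, by omega⟩
  rw [pv_testBit_set_bitL]
  simp

theorem set_bits_spec : Claim_equal_set_bits := by
  intro num led_1 led_2 led_3 _hD hP
  unfold Spec_set_bits
  obtain ⟨h1, h2, h3⟩ := hP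
  rcases led_1 with _ | ⟨a0, _ | ⟨a1, _ | ⟨a2, t1⟩⟩⟩ <;> simp at h1
  rcases led_2 with _ | ⟨b0, _ | ⟨b1, _ | ⟨b2, t2⟩⟩⟩ <;> simp at h2
  rcases led_3 with _ | ⟨c0, _ | ⟨c1, _ | ⟨c2, t3⟩⟩⟩ <;> simp at h3
  have r1 : PySem.List.pyRange 0 3 1 = [0, 1, 2] := by decide
  have r2 : PySem.List.pyRange 3 6 1 = [3, 4, 5] := by decide
  have r3 : PySem.List.pyRange 6 9 1 = [6, 7, 8] := by decide
  apply pv_int_ext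
  intro k
  have c511 : (511 : Int).testBit k = Nat.testBit 511 k := rfl
  have d1 : (1 : Int).testBit k = Nat.testBit 1 k := rfl
  have d2 : (2 : Int).testBit k = Nat.testBit 2 k := rfl
  have d4 : (4 : Int).testBit k = Nat.testBit 4 k := rfl
  have d8 : (8 : Int).testBit k = Nat.testBit 8 k := rfl
  have d16 : (16 : Int).testBit k = Nat.testBit 16 k := rfl
  have d32 : (32 : Int).testBit k = Nat.testBit 32 k := rfl
  have d64 : (64 : Int).testBit k = Nat.testBit 64 k := rfl
  have d128 : (128 : Int).testBit k = Nat.testBit 128 k := rfl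
  have d256 : (256 : Int).testBit k = Nat.testBit 256 k := rfl
  have d0 : (0 : Int).testBit k = Nat.testBit 0 k := rfl
  simp only [set_bits, set_bits_alt, r1, r2, r3, List.foldl]
  norm_num [PySem.List.pyGetD_ofNat']
  rw [pv_testBit_set_bitL' _ _ _ (by norm_num) k, pv_testBit_set_bitL' _ _ _ (by norm_num) k,
    pv_testBit_set_bitL' _ _ _ (by norm_num) k, pv_testBit_set_bitL' _ _ _ (by norm_num) k,
    pv_testBit_set_bitL' _ _ _ (by norm_num) k, pv_testBit_set_bitL' _ _ _ (by norm_num) k,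
    pv_testBit_set_bitL' _ _ _ (by norm_num) k, pv_testBit_set_bitL' _ _ _ (by norm_num) k,
    pv_testBit_set_bitL' _ _ _ (by norm_num) k]
  simp only [pv_bor_eq_lor, pv_band_eq_land, pv_not_eq_lnot,
    apply_ite (fun x : Int => x.testBit k), Int.testBit_land, Int.testBit_lor, Int.testBit_lnot,
    c511, d0, d1, d2, d4, d8, d16, d32, d64, d128, d256]
  norm_num
  rcases k with _ | _ | _ | _ | _ | _ | _ | _ | _ | k <;>
    simp [Nat.testBit_succ]
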